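-- pv_equiv track=rewrite | github.com/brentpayne/phrase | tokenization.py | convert_to_idruns
-- ===== SOURCE A (Python) =====
-- def convert_to_idruns(line, token2id):
--     rv = []
--     run = []
--     for token in line:
--         id = token2id.get(token, None)
--         if id is not None:
--             run.append(id)
--         else: # id is None
--             if len(run):
--                 rv.append(run)
--                 run = []
--     if len(run):
--         rv.append(run)
--     return rv
-- ===== SOURCE B (Python) =====
-- def convert_to_idruns(line, token2id):
--     rv = []
--     n = len(line)
--     i = 0
--     while i < n:
--         if token2id.get(line[i]) is None:
--             i += 1
--         else:
--             j = i + 1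
--             while j < n and token2id.get(line[j]) is not None:
--                 j += 1
--             rv.append([token2id[t] for t in line[i:j]])
--             i = j
--     return rv
-- ===== Notes on version B (the rewrite author's own statement) =====
-- stated objective: alternative
-- what changed: Replaces the accumulator-with-flush fold by a two-pointer scan: skip unknown tokens, find each maximal run's end index with an inner scan, and emit the run via a slice comprehension.
import Mathlib
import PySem

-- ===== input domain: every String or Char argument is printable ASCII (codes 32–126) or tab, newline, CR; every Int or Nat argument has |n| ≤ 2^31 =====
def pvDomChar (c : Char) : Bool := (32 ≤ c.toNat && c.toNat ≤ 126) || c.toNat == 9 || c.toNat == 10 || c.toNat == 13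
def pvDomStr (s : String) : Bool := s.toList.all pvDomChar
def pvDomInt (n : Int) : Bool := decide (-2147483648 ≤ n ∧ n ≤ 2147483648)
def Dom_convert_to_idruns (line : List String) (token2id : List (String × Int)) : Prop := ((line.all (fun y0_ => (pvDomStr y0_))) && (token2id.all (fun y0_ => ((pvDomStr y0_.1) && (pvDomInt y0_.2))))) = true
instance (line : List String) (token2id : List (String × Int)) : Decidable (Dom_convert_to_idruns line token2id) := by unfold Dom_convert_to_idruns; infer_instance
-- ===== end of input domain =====

-- B replaces A's accumulator-with-flush fold by a two-pointer run scan (alternative structure, same cost).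

-- ===== PORT A =====
-- literal port of A: fold over the line with state (rv, run), then the final flush
def convert_to_idruns (line : List String) (token2id : List (String × Int)) : List (List Int) :=
  let d := PySem.Dict.ofList token2id
  let st := line.foldl (fun (s : List (List Int) × List Int) token =>
      match d.get? token with
      | some id => (s.1, s.2 ++ [id])
      | none => if s.2.length ≠ 0 then (s.1 ++ [s.2], ([] : List Int)) else s) ([], [])
  if st.2.length ≠ 0 then st.1 ++ [st.2] else st.1

-- ===== PORT B =====
-- inner while loop of B: advance j while line[j] is a known token; the fuel argument only makes the
-- recursion structural (it bounds the remaining iterations and is never exhausted mid-loop)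
def bScan (d : PySem.Dict String Int) (line : List String) (n : Nat) : Nat → Nat → Nat
  | 0, j => j
  | fuel + 1, j =>
    if j < n ∧ (d.get? (line.getD j "")).isSome then bScan d line n fuel (j + 1) else j

-- outer while loop of B (i is the current index; line[i:j] is the emitted run; fuel as above)
def bLoop (d : PySem.Dict String Int) (line : List String) (n : Nat) : Nat → Nat → List (List Int)
  | 0, _ => []
  | fuel + 1, i =>
    if i < n then
      match d.get? (line.getD i "") with
      | none => bLoop d line n fuel (i + 1)
      | some _ =>
        let j := bScan d line n (n - (i + 1)) (i + 1)
        (((line.drop i).take (j - i)).map (fun t => (d.get? t).getD 0)) :: bLoop d line n fuel j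
    else []

-- port of B: two-pointer scan; (line.get ⟨i, hlt⟩) and line[i:j] use in-range indices (i < n), so getD/drop-take are
-- exact; token2id[t] inside the run is a present key, ported as get?.getD 0
def convert_to_idruns_alt (line : List String) (token2id : List (String × Int)) : List (List Int) :=
  let d := PySem.Dict.ofList token2id
  bLoop d line line.length (line.length + 1) 0

-- ===== PRECONDITION & SPEC =====
def Spec_convert_to_idruns (line : List String) (token2id : List (String × Int)) (out : List (List Int)) : Prop := out = convert_to_idruns_alt line token2id
instance (line : List String) (token2id : List (String × Int)) (out : List (List Int)) : Decidable (Spec_convert_to_idruns line token2id out) := by unfold Spec_convert_to_idruns; infer_instance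

-- ===== CLAIM (what is proved, stated in full; the proofs are below) =====
def Claim_equal_convert_to_idruns : Prop := ∀ (line : List String) (token2id : List (String × Int)), Dom_convert_to_idruns line token2id → Spec_convert_to_idruns line token2id (convert_to_idruns line token2id)

-- ===== LEMMAS AND PROOFS =====

-- canonical run decomposition, the common reference point of both proofs
def runsOf (g : String → Option Int) : List String → List (List Int)
  | [] => []
  | t :: ts =>
    match g t with
    | none => runsOf g ts
    | some v =>
      (v :: (ts.takeWhile (fun s => (g s).isSome)).map (fun s => (g s).getD 0))
        :: runsOf g (ts.dropWhile (fun s => (g s).isSome))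
termination_by l => l.length
decreasing_by
  · simp
  · have h1 := List.Sublist.length_le (List.dropWhile_sublist (l := ts) (fun s => (g s).isSome))
    simp; omega


-- A in recursive form (pending run `run`)
def pendA (g : String → Option Int) (run : List Int) : List String → List (List Int)
  | [] => if run.length ≠ 0 then [run] else []
  | t :: ts =>
    match g t with
    | some v => pendA g (run ++ [v]) ts
    | none => if run.length ≠ 0 then run :: pendA g [] ts else pendA g run ts

theorem A_eq_pendA (d : PySem.Dict String Int) (ts : List String) :
    ∀ (rv : List (List Int)) (run : List Int),
    (let st := ts.foldl (fun (s : List (List Int) × List Int) token =>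
        match d.get? token with
        | some id => (s.1, s.2 ++ [id])
        | none => if s.2.length ≠ 0 then (s.1 ++ [s.2], ([] : List Int)) else s) (rv, run)
     if st.2.length ≠ 0 then st.1 ++ [st.2] else st.1)
      = rv ++ pendA (fun t => d.get? t) run ts := by
  induction ts with
  | nil =>
    intro rv run
    simp only [List.foldl_nil, pendA]
    split <;> simp
  | cons t ts ih =>
    intro rv run
    simp only [List.foldl_cons, pendA]
    cases hg : d.get? t with
    | some v => simpa using ih rv (run ++ [v])
    | none =>
      by_cases hr : run.length ≠ 0
      · simp only [hg, if_pos hr]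
        rw [ih (rv ++ [run]) []]
        simp [pendA]
      · simp only [hg, if_neg hr]
        exact ih rv run

theorem pendA_eq_runsOf (g : String → Option Int) (ts : List String) :
    ∀ run : List Int,
    pendA g run ts =
      if run = [] then runsOf g ts
      else (run ++ (ts.takeWhile (fun s => (g s).isSome)).map (fun s => (g s).getD 0))
             :: runsOf g (ts.dropWhile (fun s => (g s).isSome)) := by
  induction ts with
  | nil =>
    intro run
    simp only [pendA, runsOf, List.takeWhile_nil, List.dropWhile_nil, List.map_nil, List.append_nil]
    rcases eq_or_ne run [] with h | h <;> simp [h]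
  | cons t ts ih =>
    intro run
    cases hg : g t with
    | some v =>
      have hps : (fun s => (g s).isSome) t = true := by simp [hg]
      simp only [pendA, hg, ih (run ++ [v]), List.takeWhile_cons, List.dropWhile_cons, hps,
        if_true, List.map_cons]
      rcases eq_or_ne run [] with h | h
      · simp [h, runsOf, hg]
      · simp [h, hg]
    | none =>
      have hps : (fun s => (g s).isSome) t = false := by simp [hg]
      simp only [pendA, hg, List.takeWhile_cons, List.dropWhile_cons, hps]
      rcases eq_or_ne run [] with h | h
      · simp [h, ih [], runsOf, hg]
      · have hl : run.length ≠ 0 := by simpa using h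
        simp only [if_pos hl, ih [], if_pos rfl, if_neg h]
        simp [runsOf, hg]

theorem take_length_takeWhile {α : Type} (p : α → Bool) (l : List α) :
    l.take (l.takeWhile p).length = l.takeWhile p := by
  induction l with
  | nil => simp
  | cons a l ih =>
    by_cases h : p a = true
    · simp [List.takeWhile_cons, h, ih]
    · simp [List.takeWhile_cons, h]

theorem dropWhile_eq_drop_length {α : Type} (p : α → Bool) (l : List α) :
    l.dropWhile p = l.drop (l.takeWhile p).length := by
  induction l with
  | nil => simp
  | cons a l ih =>
    by_cases h : p a = true
    · simp [List.takeWhile_cons, List.dropWhile_cons, h, ih]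
    · simp [List.takeWhile_cons, List.dropWhile_cons, h]

theorem bScan_eq (d : PySem.Dict String Int) (line : List String) (fuel : Nat) :
    ∀ j : Nat, j ≤ line.length → line.length - j ≤ fuel →
    bScan d line line.length fuel j =
      j + ((line.drop j).takeWhile (fun s => (d.get? s).isSome)).length := by
  induction fuel with
  | zero =>
    intro j hj hf
    have hge : line.length ≤ j := by omega
    rw [bScan, List.drop_eq_nil_of_le hge]
    simp
  | succ fuel ih =>
    intro j hj hf
    rw [bScan]
    by_cases hc : j < line.length ∧ (d.get? (line.getD j "")).isSome
    · obtain ⟨hlt, hsome⟩ := hc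
      rw [if_pos ⟨hlt, hsome⟩, ih (j + 1) (by omega) (by omega)]
      have hget : line.getD j "" = line.get ⟨j, hlt⟩ := List.getD_eq_getElem line "" hlt
      have hdrop : line.drop j = (line.get ⟨j, hlt⟩) :: line.drop (j + 1) :=
        List.drop_eq_getElem_cons hlt
      rw [hdrop, List.takeWhile_cons]
      rw [hget] at hsome
      simp only [hsome, if_true, List.length_cons]
      omega
    · rw [if_neg hc]
      rcases Nat.lt_or_ge j line.length with hlt | hge
      · have hget : line.getD j "" = line.get ⟨j, hlt⟩ := List.getD_eq_getElem line "" hlt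
        have hnone : d.get? (line.get ⟨j, hlt⟩) = none := by
          cases hx : d.get? (line.get ⟨j, hlt⟩) with
          | none => rfl
          | some v => exact absurd ⟨hlt, by rw [hget, hx]; rfl⟩ hc
        have hdrop : line.drop j = (line.get ⟨j, hlt⟩) :: line.drop (j + 1) :=
          List.drop_eq_getElem_cons hlt
        rw [hdrop, List.takeWhile_cons]
        simp only [hnone]
        simp
      · rw [List.drop_eq_nil_of_le hge]
        simp

theorem bLoop_eq (d : PySem.Dict String Int) (line : List String) (fuel : Nat) :
    ∀ i : Nat, i ≤ line.length → line.length + 1 - i ≤ fuel →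
    bLoop d line line.length fuel i = runsOf (fun t => d.get? t) (line.drop i) := by
  induction fuel with
  | zero => intro i hi hf; omega
  | succ fuel ih =>
    intro i hi hf
    rw [bLoop]
    by_cases hlt : i < line.length
    · rw [if_pos hlt]
      have hget : line.getD i "" = line.get ⟨i, hlt⟩ := List.getD_eq_getElem line "" hlt
      have hdrop : line.drop i = (line.get ⟨i, hlt⟩) :: line.drop (i + 1) :=
        List.drop_eq_getElem_cons hlt
      cases hg : d.get? (line.get ⟨i, hlt⟩) with
      | none =>
        rw [hget]
        simp only [hg]
        rw [ih (i + 1) (by omega) (by omega)]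
        conv_rhs => rw [hdrop, runsOf]
        simp only [hg]
      | some v =>
        set p : String → Bool := fun s => (d.get? s).isSome with hp
        have hscan : bScan d line line.length (line.length - (i + 1)) (i + 1) =
            (i + 1) + ((line.drop (i + 1)).takeWhile p).length :=
          bScan_eq d line (line.length - (i + 1)) (i + 1) (by omega) (by omega)
        set t : Nat := ((line.drop (i + 1)).takeWhile p).length with ht
        have hjle : (i + 1) + t ≤ line.length := by
          have h1 : ((line.drop (i + 1)).takeWhile p).length ≤ (line.drop (i + 1)).length :=
            List.Sublist.length_le (List.takeWhile_sublist p)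
          have h2 : (line.drop (i + 1)).length = line.length - (i + 1) := List.length_drop
          omega
        rw [hget]
        simp only [hg, hscan]
        rw [ih ((i + 1) + t) hjle (by omega)]
        have hsub : (i + 1) + t - i = t + 1 := by omega
        have htake : (line.drop i).take ((i + 1) + t - i)
            = (line.get ⟨i, hlt⟩) :: (line.drop (i + 1)).takeWhile p := by
          rw [hsub, hdrop, List.take_succ_cons, ht, take_length_takeWhile]
        have hdropj : line.drop ((i + 1) + t) = (line.drop (i + 1)).dropWhile p := by
          rw [dropWhile_eq_drop_length, List.drop_drop, ← ht]
          try congr 1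
          try omega
        rw [htake, hdropj]
        conv_rhs => rw [hdrop, runsOf]
        simp only [hg, hp, List.map_cons, Option.getD_some]
    · rw [if_neg hlt]
      have : i = line.length := by omega
      rw [this, List.drop_length, runsOf]

-- ===== VERDICT (by name: the statement is the Claim_ definition above) =====
theorem convert_to_idruns_spec : Claim_equal_convert_to_idruns := by
  intro line token2id _
  unfold Spec_convert_to_idruns convert_to_idruns convert_to_idruns_alt
  rw [bLoop_eq _ _ _ 0 (by omega) (by omega), List.drop_zero]
  have := A_eq_pendA (PySem.Dict.ofList token2id) line [] []
  simp only [List.nil_append] at this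
  rw [this, pendA_eq_runsOf, if_pos rfl]
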